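-- pv_equiv track=rewrite | github.com/devch96/cote | pro/test/lv1/crain.py | solution
-- ===== SOURCE A (Python) =====
-- def solution(board, moves):
--     board = list(zip(*board[::-1]))
--     for a in range(len(board)):
--         board[a] = list(filter(lambda x:x!=0, board[a]))
--     count = 0
--     bag = []
--     for i in moves:
--         if board[i-1]:
--             cur = board[i-1].pop()
--             bag.append(cur)
--         if len(bag) > 1:
--             if bag[-2] == bag[-1]:
--                 count += 1
--                 del bag[-2:]
--     return count*2
-- ===== SOURCE B (Python) =====
-- def solution(board, moves):
--     # Scan a mutable copy of the grid directly: for each move, take the first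
--     # non-zero cell of that column from the top and zero it out.
--     grid = [row[:] for row in board]
--     count = 0
--     bag = []
--     for i in moves:
--         for row in grid:
--             if row[i - 1] != 0:
--                 bag.append(row[i - 1])
--                 row[i - 1] = 0
--                 break
--         if len(bag) > 1 and bag[-1] == bag[-2]:
--             count += 1
--             del bag[-2:]
--     return count * 2
-- ===== Notes on version B (the rewrite author's own statement) =====
-- stated objective: simpler
-- what changed: B drops A's rotate-the-board (zip(*board[::-1])) and prebuilt per-column stacks and instead works on a copy of the grid itself, scanning the moved column top-down for the first non-zero cell and zeroing it; the bag pair-cancel loop is unchanged.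
-- outside the precondition, e.g. on solution([[1, 2], [2]], [0, 0]): A returns 0, B returns 2
import Mathlib
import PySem

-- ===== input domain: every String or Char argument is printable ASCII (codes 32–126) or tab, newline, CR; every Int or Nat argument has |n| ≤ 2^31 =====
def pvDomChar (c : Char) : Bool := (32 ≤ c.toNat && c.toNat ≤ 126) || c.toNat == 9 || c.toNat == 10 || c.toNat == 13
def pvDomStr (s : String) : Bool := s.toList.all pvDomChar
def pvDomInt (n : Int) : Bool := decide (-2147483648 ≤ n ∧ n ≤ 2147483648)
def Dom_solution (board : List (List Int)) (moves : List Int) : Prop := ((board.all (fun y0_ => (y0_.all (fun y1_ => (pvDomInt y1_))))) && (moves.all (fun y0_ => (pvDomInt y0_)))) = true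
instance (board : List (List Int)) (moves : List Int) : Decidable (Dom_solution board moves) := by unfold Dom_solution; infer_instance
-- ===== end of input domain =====

-- B keeps the grid and scans each moved column top-down instead of prebuilding
-- per-column stacks; same return value, neither version mutates the argument.

-- ===== PORT A =====
-- list(zip(*rows)): truncate to the shortest row, column a = a-th entry of each row
def zipStar (rows : List (List Int)) : List (List Int) :=
  match rows with
  | [] => []
  | r0 :: rest =>
    let m := rest.foldl (fun acc r => min acc r.length) r0.length
    (List.range m).map (fun a => (r0 :: rest).map (fun r => r.getD a 0))

-- body of A's 'for i in moves' loop (state: rotated board, bag, count)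
def solStep (st : List (List Int) × List Int × Int) (i : Int) :
    List (List Int) × List Int × Int :=
  let cols := st.1
  let bag := st.2.1
  let count := st.2.2
  let col := PySem.List.pyGetD cols (i - 1) []   -- board[i-1]
  let cols2 := if col ≠ [] then PySem.List.pySetD cols (i - 1) col.dropLast else cols
  let bag2 := if col ≠ [] then bag ++ [col.getLastD 0] else bag   -- cur = pop(); bag.append(cur)
  if 1 < bag2.length then
    if PySem.List.pyGetD bag2 (-2) 0 = PySem.List.pyGetD bag2 (-1) 0 then
      (cols2, bag2.dropLast.dropLast, count + 1)   -- del bag[-2:]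
    else (cols2, bag2, count)
  else (cols2, bag2, count)

def solution (board : List (List Int)) (moves : List Int) : Int :=
  let b1 := zipStar board.reverse                      -- list(zip(*board[::-1]))
  let b2 := b1.map (fun c => c.filter (fun x => x ≠ 0))  -- filter(lambda x: x != 0, …)
  (moves.foldl solStep (b2, ([], 0))).2.2 * 2

-- ===== PORT B =====
-- B's inner 'for row in grid: … break' loop: first non-zero cell of the column, zeroed
def scanCol : List (List Int) → Int → Option Int × List (List Int)
  | [], _ => (none, [])
  | r :: rs, idx =>
    if PySem.List.pyGetD r idx 0 ≠ 0 then
      (some (PySem.List.pyGetD r idx 0), PySem.List.pySetD r idx 0 :: rs)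
    else
      let p := scanCol rs idx
      (p.1, r :: p.2)

-- body of B's 'for i in moves' loop (state: grid, bag, count)
def altStep (st : List (List Int) × List Int × Int) (i : Int) :
    List (List Int) × List Int × Int :=
  let p := scanCol st.1 (i - 1)
  let bag2 := match p.1 with
    | some v => st.2.1 ++ [v]
    | none => st.2.1
  if 1 < bag2.length ∧ PySem.List.pyGetD bag2 (-1) 0 = PySem.List.pyGetD bag2 (-2) 0 then
    (p.2, bag2.dropLast.dropLast, st.2.2 + 1)
  else (p.2, bag2, st.2.2)

def solution_alt (board : List (List Int)) (moves : List Int) : Int :=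
  (moves.foldl altStep (board, ([], 0))).2.2 * 2

-- ===== PRECONDITION & SPEC =====
-- Pre_ excludes (unless moves is empty) ragged boards — a corner where A's zip
-- silently truncates rows to the shortest and B reads the full grid, both defensible —
-- and moves whose column index is out of range, on which A raises IndexError.
def Pre_solution (board : List (List Int)) (moves : List Int) : Prop :=
  moves = [] ∨
  ((∀ r ∈ board, r.length = (board.headD []).length) ∧
   ∀ i ∈ moves, -((board.headD []).length : Int) ≤ i - 1 ∧
     i - 1 < ((board.headD []).length : Int))
instance (board : List (List Int)) (moves : List Int) : Decidable (Pre_solution board moves) := by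
  unfold Pre_solution; infer_instance

def pvWitness_solution : List (List Int) × List Int := ([[0, 1], [2, 2]], [2, 2, 1])

def Spec_solution (board : List (List Int)) (moves : List Int) (out : Int) : Prop := out = solution_alt board moves
instance (board : List (List Int)) (moves : List Int) (out : Int) : Decidable (Spec_solution board moves out) := by unfold Spec_solution; infer_instance

-- ===== CLAIM (what is proved, stated in full; the proofs are below) =====
def Claim_equal_solution : Prop := ∀ (board : List (List Int)) (moves : List Int), Dom_solution board moves → Pre_solution board moves → Spec_solution board moves (solution board moves)

-- ===== LEMMAS AND PROOFS =====

def pyNormIdx (n : Nat) (i : Int) : Nat := (if i < 0 then i + n else i).toNat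
def colNZ (g : List (List Int)) (j : Nat) : List Int :=
  (g.map (fun r => r[j]?.getD 0)).filter (fun x => x ≠ 0)

theorem pyNormIdx_lt (n : Nat) (i : Int) (h1 : -(n : Int) ≤ i) (h2 : i < n) :
    pyNormIdx n i < n := by
  unfold pyNormIdx; split <;> omega

theorem pyIdx?_eq (n : Nat) (i : Int) (h1 : -(n : Int) ≤ i) (h2 : i < n) :
    PySem.List.pyIdx? n i = some (pyNormIdx n i) := by
  unfold PySem.List.pyIdx? pyNormIdx
  split_ifs <;> first | omega | (congr 1 <;> omega)

theorem pyGetD_norm {α : Type} (xs : List α) (i : Int) (d : α)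
    (h1 : -(xs.length : Int) ≤ i) (h2 : i < xs.length) :
    PySem.List.pyGetD xs i d = xs[pyNormIdx xs.length i]?.getD d := by
  simp [PySem.List.pyGetD, PySem.List.pyGet?, pyIdx?_eq xs.length i h1 h2]

theorem pySetD_norm {α : Type} (xs : List α) (i : Int) (v : α)
    (h1 : -(xs.length : Int) ≤ i) (h2 : i < xs.length) :
    PySem.List.pySetD xs i v = xs.set (pyNormIdx xs.length i) v := by
  simp [PySem.List.pySetD, PySem.List.pySet?, pyIdx?_eq xs.length i h1 h2]

theorem getD_set_lt {α : Type} (xs : List α) (k j : Nat) (v d : α) (hj : j < xs.length) :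
    ((xs.set k v)[j]?).getD d = if j = k then v else xs[j]?.getD d := by
  by_cases h : j = k
  · subst h; simp [hj]
  · rw [List.getElem?_set, if_neg (fun hkj => h hkj.symm), if_neg h]

theorem colNZ_cons (r : List Int) (rs : List (List Int)) (j : Nat) :
    colNZ (r :: rs) j =
      (if r[j]?.getD 0 ≠ 0 then [r[j]?.getD 0] else []) ++ colNZ rs j := by
  by_cases h : r[j]?.getD 0 = 0 <;> simp [colNZ, h]

theorem scanCol_spec (n : Nat) (idx : Int) (h1 : -(n : Int) ≤ idx) (h2 : idx < n)
    (grid : List (List Int)) (hg : ∀ r ∈ grid, r.length = n) :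
    (scanCol grid idx).1 = (colNZ grid (pyNormIdx n idx)).head? ∧
    (∀ r ∈ (scanCol grid idx).2, r.length = n) ∧
    (∀ j, j < n →
      colNZ (scanCol grid idx).2 j =
        if j = pyNormIdx n idx then (colNZ grid j).tail else colNZ grid j) := by
  have hj0 : pyNormIdx n idx < n := pyNormIdx_lt n idx h1 h2
  induction grid with
  | nil => simp [scanCol, colNZ]
  | cons r rs ih =>
    have hr : r.length = n := hg r (by simp)
    have hrs : ∀ r' ∈ rs, r'.length = n := fun r' h => hg r' (by simp [h])
    have hget : PySem.List.pyGetD r idx 0 = r[pyNormIdx n idx]?.getD 0 := by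
      rw [pyGetD_norm r idx 0 (by rw [hr]; exact h1) (by rw [hr]; exact_mod_cast h2), hr]
    have hset : PySem.List.pySetD r idx (0 : Int) = r.set (pyNormIdx n idx) 0 := by
      rw [pySetD_norm r idx 0 (by rw [hr]; exact h1) (by rw [hr]; exact_mod_cast h2), hr]
    obtain ⟨ih1, ih2, ih3⟩ := ih hrs
    by_cases hv : r[pyNormIdx n idx]?.getD 0 = 0
    · -- this row's cell is zero: the scan moves on
      have hsc : scanCol (r :: rs) idx = ((scanCol rs idx).1, r :: (scanCol rs idx).2) := by
        simp [scanCol, hget, hv]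
      refine ⟨?_, ?_, ?_⟩
      · rw [hsc, colNZ_cons]; simp [hv, ih1]
      · intro r' hr'
        rw [hsc] at hr'
        rcases List.mem_cons.mp hr' with h' | h'
        · simp [h', hr]
        · exact ih2 r' h'
      · intro j hj
        rw [hsc, colNZ_cons, colNZ_cons, ih3 j hj]
        by_cases hje : j = pyNormIdx n idx
        · simp [hje, hv]
        · simp [hje]
    · -- first non-zero cell is in this row: take it and zero it
      have hsc : scanCol (r :: rs) idx =
          (some (r[pyNormIdx n idx]?.getD 0), r.set (pyNormIdx n idx) 0 :: rs) := by
        simp [scanCol, hget, hset, hv]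
      refine ⟨?_, ?_, ?_⟩
      · rw [hsc, colNZ_cons]; simp [hv]
      · intro r' hr'
        rw [hsc] at hr'
        rcases List.mem_cons.mp hr' with h' | h'
        · simp [h', hr]
        · exact hrs r' h'
      · intro j hj
        rw [hsc, colNZ_cons, colNZ_cons,
          getD_set_lt r (pyNormIdx n idx) j 0 0 (by omega)]
        by_cases hje : j = pyNormIdx n idx
        · simp [hje, hv]
        · simp [hje]

theorem step_sim (n : Nat) (i : Int) (hi1 : -(n : Int) ≤ i - 1) (hi2 : i - 1 < n)
    (cols grid : List (List Int)) (bag : List Int) (cnt : Int)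
    (hg : ∀ r ∈ grid, r.length = n) (hc : cols.length = n)
    (hinv : ∀ j, j < n → cols[j]?.getD [] = (colNZ grid j).reverse) :
    (solStep (cols, bag, cnt) i).2 = (altStep (grid, bag, cnt) i).2 ∧
    (∀ r ∈ (altStep (grid, bag, cnt) i).1, r.length = n) ∧
    (solStep (cols, bag, cnt) i).1.length = n ∧
    (∀ j, j < n →
      (solStep (cols, bag, cnt) i).1[j]?.getD [] =
        (colNZ (altStep (grid, bag, cnt) i).1 j).reverse) := by
  have hj0 : pyNormIdx n (i - 1) < n := pyNormIdx_lt n (i - 1) hi1 hi2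
  have hcol : PySem.List.pyGetD cols (i - 1) [] = (colNZ grid (pyNormIdx n (i - 1))).reverse := by
    rw [pyGetD_norm cols (i - 1) [] (by rw [hc]; exact hi1) (by rw [hc]; exact_mod_cast hi2), hc]
    exact hinv _ hj0
  obtain ⟨hs1, hs2, hs3⟩ := scanCol_spec n (i - 1) hi1 hi2 grid hg
  rcases hcnz : colNZ grid (pyNormIdx n (i - 1)) with _ | ⟨c, cs⟩
  · -- empty column: neither side takes anything
    have hcol' : PySem.List.pyGetD cols (i - 1) [] = ([] : List Int) := by
      rw [hcol, hcnz]; rfl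
    have hA : solStep (cols, bag, cnt) i =
        (if 1 < bag.length then
          if PySem.List.pyGetD bag (-2) 0 = PySem.List.pyGetD bag (-1) 0 then
            (cols, bag.dropLast.dropLast, cnt + 1)
          else (cols, bag, cnt)
        else (cols, bag, cnt)) := by
      simp only [solStep, hcol']; simp
    have hB : altStep (grid, bag, cnt) i =
        (if 1 < bag.length ∧ PySem.List.pyGetD bag (-1) 0 = PySem.List.pyGetD bag (-2) 0 then
          ((scanCol grid (i - 1)).2, bag.dropLast.dropLast, cnt + 1)
        else ((scanCol grid (i - 1)).2, bag, cnt)) := by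
      simp only [altStep, hs1, hcnz]; rfl
    have hcols' : ∀ j, j < n → cols[j]?.getD [] = (colNZ (scanCol grid (i - 1)).2 j).reverse := by
      intro j hj
      rw [hs3 j hj]
      by_cases hje : j = pyNormIdx n (i - 1)
      · rw [if_pos hje, hje, hcnz]; simpa [hje, hcnz] using hinv _ hj
      · rw [if_neg hje]; exact hinv _ hj
    rw [hA, hB]
    by_cases hlen : 1 < bag.length
    · by_cases heq : PySem.List.pyGetD bag (-2) 0 = PySem.List.pyGetD bag (-1) 0
      · rw [if_pos hlen, if_pos heq, if_pos (And.intro hlen heq.symm)]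
        exact ⟨rfl, hs2, hc, hcols'⟩
      · have hne2 : ¬ (1 < bag.length ∧ PySem.List.pyGetD bag (-1) 0 = PySem.List.pyGetD bag (-2) 0) :=
          fun h => heq h.2.symm
        rw [if_pos hlen, if_neg heq, if_neg hne2]
        exact ⟨rfl, hs2, hc, hcols'⟩
    · have hne2 : ¬ (1 < bag.length ∧ PySem.List.pyGetD bag (-1) 0 = PySem.List.pyGetD bag (-2) 0) :=
        fun h => hlen h.1
      rw [if_neg hlen, if_neg hne2]
      exact ⟨rfl, hs2, hc, hcols'⟩
  · -- non-empty column: both sides take c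
    have hcol' : PySem.List.pyGetD cols (i - 1) [] = cs.reverse ++ [c] := by
      rw [hcol, hcnz]; simp
    have hset : PySem.List.pySetD cols (i - 1) ((cs.reverse ++ [c]).dropLast) =
        cols.set (pyNormIdx n (i - 1)) cs.reverse := by
      rw [List.dropLast_concat,
        pySetD_norm cols (i - 1) _ (by rw [hc]; exact hi1) (by rw [hc]; exact_mod_cast hi2), hc]
    have hne : (cs.reverse ++ [c] : List Int) ≠ [] := by simp
    have hA : solStep (cols, bag, cnt) i =
        (if 1 < (bag ++ [c]).length then
          if PySem.List.pyGetD (bag ++ [c]) (-2) 0 = PySem.List.pyGetD (bag ++ [c]) (-1) 0 then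
            (cols.set (pyNormIdx n (i - 1)) cs.reverse, (bag ++ [c]).dropLast.dropLast, cnt + 1)
          else (cols.set (pyNormIdx n (i - 1)) cs.reverse, bag ++ [c], cnt)
        else (cols.set (pyNormIdx n (i - 1)) cs.reverse, bag ++ [c], cnt)) := by
      simp only [solStep, hcol', if_pos hne, hset, List.getLastD_concat]
    have hB : altStep (grid, bag, cnt) i =
        (if 1 < (bag ++ [c]).length ∧
            PySem.List.pyGetD (bag ++ [c]) (-1) 0 = PySem.List.pyGetD (bag ++ [c]) (-2) 0 then
          ((scanCol grid (i - 1)).2, (bag ++ [c]).dropLast.dropLast, cnt + 1)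
        else ((scanCol grid (i - 1)).2, bag ++ [c], cnt)) := by
      simp only [altStep, hs1, hcnz]; rfl
    have hlen' : (cols.set (pyNormIdx n (i - 1)) cs.reverse).length = n := by simp [hc]
    have hcols' : ∀ j, j < n →
        (cols.set (pyNormIdx n (i - 1)) cs.reverse)[j]?.getD [] =
          (colNZ (scanCol grid (i - 1)).2 j).reverse := by
      intro j hj
      rw [hs3 j hj, getD_set_lt cols (pyNormIdx n (i - 1)) j cs.reverse [] (by omega)]
      by_cases hje : j = pyNormIdx n (i - 1)
      · rw [if_pos hje, if_pos hje, hje, hcnz]; rfl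
      · rw [if_neg hje, if_neg hje]; exact hinv _ hj
    rw [hA, hB]
    by_cases hlen : 1 < (bag ++ [c]).length
    · by_cases heq : PySem.List.pyGetD (bag ++ [c]) (-2) 0 = PySem.List.pyGetD (bag ++ [c]) (-1) 0
      · rw [if_pos hlen, if_pos heq, if_pos (And.intro hlen heq.symm)]
        exact ⟨rfl, hs2, hlen', hcols'⟩
      · have hne2 : ¬ (1 < (bag ++ [c]).length ∧
            PySem.List.pyGetD (bag ++ [c]) (-1) 0 = PySem.List.pyGetD (bag ++ [c]) (-2) 0) :=
          fun h => heq h.2.symm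
        rw [if_pos hlen, if_neg heq, if_neg hne2]
        exact ⟨rfl, hs2, hlen', hcols'⟩
    · have hne2 : ¬ (1 < (bag ++ [c]).length ∧
          PySem.List.pyGetD (bag ++ [c]) (-1) 0 = PySem.List.pyGetD (bag ++ [c]) (-2) 0) :=
        fun h => hlen h.1
      rw [if_neg hlen, if_neg hne2]
      exact ⟨rfl, hs2, hlen', hcols'⟩

theorem fold_sim (n : Nat) (moves : List Int)
    (hm : ∀ i ∈ moves, -(n : Int) ≤ i - 1 ∧ i - 1 < (n : Int)) :
    ∀ (cols grid : List (List Int)) (bag : List Int) (cnt : Int),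
      (∀ r ∈ grid, r.length = n) → cols.length = n →
      (∀ j, j < n → cols[j]?.getD [] = (colNZ grid j).reverse) →
      (moves.foldl solStep (cols, bag, cnt)).2 = (moves.foldl altStep (grid, bag, cnt)).2 := by
  induction moves with
  | nil => intro cols grid bag cnt _ _ _; rfl
  | cons i ms ih =>
    intro cols grid bag cnt hg hc hinv
    obtain ⟨h1, h2⟩ := hm i (by simp)
    obtain ⟨e2, hg', hc', hinv'⟩ := step_sim n i h1 h2 cols grid bag cnt hg hc hinv
    rw [List.foldl_cons, List.foldl_cons]
    have eA : solStep (cols, bag, cnt) i =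
        ((solStep (cols, bag, cnt) i).1,
         (altStep (grid, bag, cnt) i).2.1, (altStep (grid, bag, cnt) i).2.2) := by
      rw [← e2]
    have eB : altStep (grid, bag, cnt) i =
        ((altStep (grid, bag, cnt) i).1,
         (altStep (grid, bag, cnt) i).2.1, (altStep (grid, bag, cnt) i).2.2) := rfl
    rw [eA, eB]
    exact ih (fun j hj => hm j (by simp [hj])) _ _ _ _ hg' hc' hinv'

theorem foldl_min_const (l : List (List Int)) (n : Nat) (h : ∀ r ∈ l, r.length = n) :
    l.foldl (fun acc r => min acc r.length) n = n := by
  induction l with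
  | nil => rfl
  | cons r rs ih =>
    have hr := h r (by simp)
    simp only [List.foldl_cons, hr, min_self]
    exact ih (fun r' h' => h r' (by simp [h']))

theorem zipStar_rect (rows : List (List Int)) (n : Nat) (hne : rows ≠ [])
    (h : ∀ r ∈ rows, r.length = n) :
    zipStar rows = (List.range n).map (fun a => rows.map (fun r => r.getD a 0)) := by
  cases rows with
  | nil => exact absurd rfl hne
  | cons q0 qs =>
    have hq0 : q0.length = n := h q0 (by simp)
    have hm : qs.foldl (fun acc r => min acc r.length) q0.length = n := by
      rw [hq0]; exact foldl_min_const qs n (fun r' h' => h r' (by simp [h']))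
    simp only [zipStar, hm]

theorem init_inv (board : List (List Int)) (n : Nat)
    (hrect : ∀ r ∈ board, r.length = n) (hn : board = [] → n = 0) :
    ((zipStar board.reverse).map (fun c => c.filter (fun x => x ≠ 0))).length = n ∧
    (∀ j, j < n →
      ((zipStar board.reverse).map (fun c => c.filter (fun x => x ≠ 0)))[j]?.getD [] =
        (colNZ board j).reverse) := by
  rcases hb : board with _ | ⟨r0, rest⟩
  · subst hb
    have : n = 0 := hn rfl
    subst this
    exact ⟨rfl, fun j hj => by omega⟩
  · rw [← hb]
    have hne : board.reverse ≠ [] := by simp [hb]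
    have hrev : ∀ r ∈ board.reverse, r.length = n := fun r hr => hrect r (List.mem_reverse.mp hr)
    rw [zipStar_rect board.reverse n hne hrev]
    constructor
    · simp
    · intro j hj
      rw [List.getElem?_map, List.getElem?_map, List.getElem?_range hj]
      simp only [Option.map_some, Option.getD_some]
      rw [colNZ, ← List.filter_reverse, ← List.map_reverse]
      rfl

-- ===== VERDICT (by name: the statement is the Claim_ definition above) =====
theorem solution_spec : Claim_equal_solution := by
  intro board moves _ hpre
  unfold Spec_solution
  rcases hpre with hpre | ⟨hrect, hm⟩
  · subst hpre; rfl
  · have hn0 : board = [] → (board.headD []).length = 0 := by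
      intro h; rw [h]; rfl
    obtain ⟨hc, hinv⟩ := init_inv board (board.headD []).length hrect hn0
    have key := fold_sim (board.headD []).length moves hm
      ((zipStar board.reverse).map (fun c => c.filter (fun x => x ≠ 0)))
      board [] 0 hrect hc hinv
    show (List.foldl solStep
        (List.map (fun c => List.filter (fun x => decide (x ≠ 0)) c) (zipStar board.reverse), [], 0)
        moves).2.2 * 2 =
      (List.foldl altStep (board, [], 0) moves).2.2 * 2
    rw [key]
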